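-- pv_equiv track=rewrite | github.com/AbdullahiSaid2/project-x | src/data/databento_live.py | _map_symbol_text_to_root
-- ===== SOURCE A (Python) =====
-- from typing import Dict, Optional
--
-- LIVE_PARENT_MAP: Dict[str, str] = {
--     "MNQ": "MNQ.FUT",
--     "MES": "MES.FUT",
--     "MYM": "MYM.FUT",
--     "MGC": "MGC.FUT",
--     "MCL": "MCL.FUT",
--     "NQ": "NQ.FUT",
--     "ES": "ES.FUT",
--     "YM": "YM.FUT",
--     "GC": "GC.FUT",
--     "CL": "CL.FUT",
-- }
--
-- def _normalize_root(text: str) -> str: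
--     s = str(text).upper().strip()
--     if s.endswith(".FUT"):
--         s = s[:-4]
--     if "." in s:
--         s = s.split(".", 1)[0]
--     return s
--
-- def _map_symbol_text_to_root(text: str) -> Optional[str]:
--     s = _normalize_root(text)
--     if s in LIVE_PARENT_MAP:
--         return s
--     for root in sorted(LIVE_PARENT_MAP.keys(), key=len, reverse=True):
--         if s.startswith(root):
--             return root
--     return None
-- ===== SOURCE B (Python) =====
-- from typing import Optional
--
-- # Every known root is either one of five two-letter mini bases or 'M' + a base (the micro).
-- _BASES = {"NQ", "ES", "YM", "GC", "CL"}
--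
-- def _map_symbol_text_to_root(text: str) -> Optional[str]:
--     # stripping a trailing ".FUT" is subsumed by cutting at the first "."
--     s = str(text).upper().strip().split(".", 1)[0]
--     if s[:1] == "M" and s[1:3] in _BASES:
--         return s[:3]
--     if s[:2] in _BASES:
--         return s[:2]
--     return None
-- ===== Notes on version B (the rewrite author's own statement) =====
-- stated objective: simpler
-- what changed: B drops the dict and the sorted-by-length key scan entirely: it exploits that every root is a two-letter base (NQ/ES/YM/GC/CL) or that base behind an M prefix, so after collapsing normalization to one split-at-first-dot it checks the 2-char base set at offset 1 and at offset 0.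
import Mathlib
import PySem

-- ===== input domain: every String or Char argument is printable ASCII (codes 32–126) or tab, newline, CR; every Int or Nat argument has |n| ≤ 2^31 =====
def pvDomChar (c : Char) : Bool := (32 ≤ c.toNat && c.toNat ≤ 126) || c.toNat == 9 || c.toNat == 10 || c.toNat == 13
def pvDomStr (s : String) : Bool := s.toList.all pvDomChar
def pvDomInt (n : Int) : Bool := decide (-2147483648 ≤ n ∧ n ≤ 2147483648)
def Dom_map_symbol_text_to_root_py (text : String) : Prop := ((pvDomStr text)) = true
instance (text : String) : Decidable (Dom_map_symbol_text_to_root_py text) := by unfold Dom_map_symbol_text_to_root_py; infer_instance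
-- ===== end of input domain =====

-- B drops A's dict and sorted-by-length key scan: every root is a two-letter base or 'M'+base,
-- so B checks a 2-char base set at offset 1 (behind an 'M') and at offset 0 (simpler; no speed claim).

-- ===== PORT A =====
-- LIVE_PARENT_MAP (module constant of A); keys written as char lists
def pvLiveParentMap : PySem.Dict (List Char) (List Char) :=
  PySem.Dict.ofList
    [ (['M','N','Q'], ['M','N','Q','.','F','U','T'])
    , (['M','E','S'], ['M','E','S','.','F','U','T'])
    , (['M','Y','M'], ['M','Y','M','.','F','U','T'])
    , (['M','G','C'], ['M','G','C','.','F','U','T'])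
    , (['M','C','L'], ['M','C','L','.','F','U','T'])
    , (['N','Q'], ['N','Q','.','F','U','T'])
    , (['E','S'], ['E','S','.','F','U','T'])
    , (['Y','M'], ['Y','M','.','F','U','T'])
    , (['G','C'], ['G','C','.','F','U','T'])
    , (['C','L'], ['C','L','.','F','U','T']) ]

-- _normalize_root (A's helper); works on the char list of the string.
-- s.split(".", 1)[0]: split of a string by a nonempty separator is always nonempty, so headD's
-- default is unreachable.
def pvNormRoot (text : String) : List Char :=
  let s := PySem.Chars.strip (PySem.Chars.upper text.toList)
  let s := if PySem.Chars.endswith s ['.','F','U','T'] then PySem.Chars.slice s none (some (-4)) else s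
  if PySem.Chars.isIn ['.'] s then (PySem.Chars.splitOnMax s ['.'] 1).headD [] else s

-- sorted(LIVE_PARENT_MAP.keys(), key=len, reverse=True)
def pvSortedKeys : List (List Char) :=
  PySem.List.sorted pvLiveParentMap.keys (fun k => k.length) true

-- the 'for root in …: if s.startswith(root): return root' loop
def pvScanA : List (List Char) → List Char → Option (List Char)
  | [], _ => none
  | r :: rest, s => if PySem.Chars.startswith s r then some r else pvScanA rest s

def map_symbol_text_to_root_py (text : String) : Option String :=
  if pvLiveParentMap.contains (pvNormRoot text) then some (String.ofList (pvNormRoot text))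
  else (pvScanA pvSortedKeys (pvNormRoot text)).map String.ofList

-- ===== PORT B =====
-- _BASES (module constant of B)
def pvBaseSet : PySem.Set (List Char) :=
  PySem.Set.ofList [['N','Q'],['E','S'],['Y','M'],['G','C'],['C','L']]

-- s[:1], s[1:3], s[:2], s[:3] have nonnegative bounds, so they are take/drop
-- (PySem.List.slice_natCast); split(".", 1)[0] is headD of splitOnMax as in A's helper.
-- s = str(text).upper().strip().split(".", 1)[0]
def pvNormB (text : String) : List Char :=
  (PySem.Chars.splitOnMax (PySem.Chars.strip (PySem.Chars.upper text.toList)) ['.'] 1).headD []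

def map_symbol_text_to_root_py_alt (text : String) : Option String :=
  if (pvNormB text).take 1 = ['M'] ∧ PySem.Set.contains pvBaseSet (((pvNormB text).drop 1).take 2) then
    some (String.ofList ((pvNormB text).take 3))
  else if PySem.Set.contains pvBaseSet ((pvNormB text).take 2) then
    some (String.ofList ((pvNormB text).take 2))
  else none

-- ===== PRECONDITION & SPEC =====
def Spec_map_symbol_text_to_root_py (text : String) (out : Option String) : Prop := out = map_symbol_text_to_root_py_alt text
instance (text : String) (out : Option String) : Decidable (Spec_map_symbol_text_to_root_py text out) := by unfold Spec_map_symbol_text_to_root_py; infer_instance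

-- ===== CLAIM (what is proved, stated in full; the proofs are below) =====
def Claim_equal_map_symbol_text_to_root_py : Prop := ∀ (text : String), Dom_map_symbol_text_to_root_py text → Spec_map_symbol_text_to_root_py text (map_symbol_text_to_root_py text)

-- ===== LEMMAS AND PROOFS =====

lemma mapEq : pvLiveParentMap = PySem.Dict.mk
    [ (['M','N','Q'], ['M','N','Q','.','F','U','T'])
    , (['M','E','S'], ['M','E','S','.','F','U','T'])
    , (['M','Y','M'], ['M','Y','M','.','F','U','T'])
    , (['M','G','C'], ['M','G','C','.','F','U','T'])
    , (['M','C','L'], ['M','C','L','.','F','U','T'])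
    , (['N','Q'], ['N','Q','.','F','U','T'])
    , (['E','S'], ['E','S','.','F','U','T'])
    , (['Y','M'], ['Y','M','.','F','U','T'])
    , (['G','C'], ['G','C','.','F','U','T'])
    , (['C','L'], ['C','L','.','F','U','T']) ] := by decide

lemma pv_contains_iff (p : List Char) :
    pvLiveParentMap.contains p = true ↔
      p = ['M','N','Q'] ∨ p = ['M','E','S'] ∨ p = ['M','Y','M'] ∨ p = ['M','G','C'] ∨ p = ['M','C','L'] ∨
      p = ['N','Q'] ∨ p = ['E','S'] ∨ p = ['Y','M'] ∨ p = ['G','C'] ∨ p = ['C','L'] := by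
  rw [mapEq]
  simp only [PySem.Dict.contains_mk, List.any_cons, List.any_nil, Bool.or_eq_true, beq_iff_eq,
    Bool.false_eq_true, or_false]
  constructor <;> rintro (h|h|h|h|h|h|h|h|h|h) <;> subst h <;> simp

lemma pv_bases_iff (p : List Char) :
    PySem.Set.contains pvBaseSet p = true ↔
      p = ['N','Q'] ∨ p = ['E','S'] ∨ p = ['Y','M'] ∨ p = ['G','C'] ∨ p = ['C','L'] := by
  simp [PySem.Set.contains,
    show pvBaseSet = [['N','Q'],['E','S'],['Y','M'],['G','C'],['C','L']] from by decide]

lemma pv_contains_len {p : List Char} (h : pvLiveParentMap.contains p = true) :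
    p.length = 3 ∨ p.length = 2 := by
  rcases (pv_contains_iff p).1 h with h|h|h|h|h|h|h|h|h|h <;> subst h <;> simp

lemma pv_bases_len {p : List Char} (h : PySem.Set.contains pvBaseSet p = true) :
    p.length = 2 := by
  rcases (pv_bases_iff p).1 h with h|h|h|h|h <;> subst h <;> simp

lemma pv_bfalse {b : Bool} (h : ¬ b = true) : b = false := by
  cases b
  · rfl
  · exact absurd rfl h

-- the common characterisation of both matchers
def pvC (s : List Char) : Option (List Char) :=
  if 3 ≤ s.length ∧ pvLiveParentMap.contains (s.take 3) = true then some (s.take 3)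
  else if 2 ≤ s.length ∧ pvLiveParentMap.contains (s.take 2) = true then some (s.take 2)
  else none

lemma pv_sortedKeys_eq :
    pvSortedKeys = [['M','N','Q'],['M','E','S'],['M','Y','M'],['M','G','C'],['M','C','L'],
                    ['N','Q'],['E','S'],['Y','M'],['G','C'],['C','L']] := by
  decide

lemma pv_sw (s k : List Char) :
    PySem.Chars.startswith s k = decide (s.take k.length = k) := by
  by_cases h : s.take k.length = k
  · simp only [h, decide_true]
    rw [PySem.Chars.startswith_iff, List.prefix_iff_eq_take]
    exact h.symm
  · simp only [h, decide_false]
    apply pv_bfalse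
    rw [PySem.Chars.startswith_iff, List.prefix_iff_eq_take]
    exact fun hh => h hh.symm

lemma pv_take_len {s k : List Char} {n : Nat} (hk : k.length = n) (h : s.take n = k) :
    n ≤ s.length := by
  have := congrArg List.length h
  simp [List.length_take, hk] at this
  omega

lemma pv_take3_cases {s : List Char} (hl : 3 ≤ s.length)
    (h : pvLiveParentMap.contains (s.take 3) = true) :
    s.take 3 = ['M','N','Q'] ∨ s.take 3 = ['M','E','S'] ∨ s.take 3 = ['M','Y','M'] ∨
    s.take 3 = ['M','G','C'] ∨ s.take 3 = ['M','C','L'] := by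
  have hlen : (s.take 3).length = 3 := by simp [List.length_take]; omega
  rcases (pv_contains_iff _).1 h with h|h|h|h|h|h|h|h|h|h <;>
    first
      | (exact Or.inl h)
      | (exact Or.inr (Or.inl h))
      | (exact Or.inr (Or.inr (Or.inl h)))
      | (exact Or.inr (Or.inr (Or.inr (Or.inl h))))
      | (exact Or.inr (Or.inr (Or.inr (Or.inr h))))
      | (rw [h] at hlen; simp at hlen)

lemma pv_take2_cases {s : List Char} (hl : 2 ≤ s.length)
    (h : pvLiveParentMap.contains (s.take 2) = true) :
    s.take 2 = ['N','Q'] ∨ s.take 2 = ['E','S'] ∨ s.take 2 = ['Y','M'] ∨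
    s.take 2 = ['G','C'] ∨ s.take 2 = ['C','L'] := by
  have hlen : (s.take 2).length = 2 := by simp [List.length_take]; omega
  rcases (pv_contains_iff _).1 h with h|h|h|h|h|h|h|h|h|h <;>
    first
      | (exact Or.inl h)
      | (exact Or.inr (Or.inl h))
      | (exact Or.inr (Or.inr (Or.inl h)))
      | (exact Or.inr (Or.inr (Or.inr (Or.inl h))))
      | (exact Or.inr (Or.inr (Or.inr (Or.inr h))))
      | (rw [h] at hlen; simp at hlen)

lemma pv_A_core (s : List Char) :
    (if pvLiveParentMap.contains s then some s else pvScanA pvSortedKeys s) = pvC s := by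
  by_cases hc : pvLiveParentMap.contains s = true
  · rw [if_pos hc]
    unfold pvC
    rcases pv_contains_len hc with hl | hl
    · have htake : s.take 3 = s := List.take_of_length_le (by omega)
      rw [if_pos ⟨by omega, by rw [htake]; exact hc⟩, htake]
    · have htake : s.take 2 = s := List.take_of_length_le (by omega)
      rw [if_neg (by rintro ⟨h, -⟩; omega), if_pos ⟨by omega, by rw [htake]; exact hc⟩, htake]
  · rw [if_neg hc, pv_sortedKeys_eq]
    simp only [pvScanA, pv_sw, List.length_cons, List.length_nil, Nat.zero_add, Nat.reduceAdd]
    unfold pvC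
    by_cases h33 : 3 ≤ s.length ∧ pvLiveParentMap.contains (s.take 3) = true
    · obtain ⟨hl, hcc⟩ := h33
      conv_rhs => rw [if_pos ⟨hl, hcc⟩]
      rcases pv_take3_cases hl hcc with h|h|h|h|h <;> simp [h]
    · conv_rhs => rw [if_neg h33]
      have hA : s.take 3 ≠ ['M','N','Q'] := fun h => h33 ⟨pv_take_len rfl h, by rw [h]; decide⟩
      have hB : s.take 3 ≠ ['M','E','S'] := fun h => h33 ⟨pv_take_len rfl h, by rw [h]; decide⟩
      have hC : s.take 3 ≠ ['M','Y','M'] := fun h => h33 ⟨pv_take_len rfl h, by rw [h]; decide⟩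
      have hD : s.take 3 ≠ ['M','G','C'] := fun h => h33 ⟨pv_take_len rfl h, by rw [h]; decide⟩
      have hE : s.take 3 ≠ ['M','C','L'] := fun h => h33 ⟨pv_take_len rfl h, by rw [h]; decide⟩
      by_cases h22 : 2 ≤ s.length ∧ pvLiveParentMap.contains (s.take 2) = true
      · obtain ⟨hl2, hcc2⟩ := h22
        conv_rhs => rw [if_pos ⟨hl2, hcc2⟩]
        rcases pv_take2_cases hl2 hcc2 with h|h|h|h|h <;> simp [hA, hB, hC, hD, hE, h]
      · conv_rhs => rw [if_neg h22]
        have hF : s.take 2 ≠ ['N','Q'] := fun h => h22 ⟨pv_take_len rfl h, by rw [h]; decide⟩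
        have hG : s.take 2 ≠ ['E','S'] := fun h => h22 ⟨pv_take_len rfl h, by rw [h]; decide⟩
        have hH : s.take 2 ≠ ['Y','M'] := fun h => h22 ⟨pv_take_len rfl h, by rw [h]; decide⟩
        have hI : s.take 2 ≠ ['G','C'] := fun h => h22 ⟨pv_take_len rfl h, by rw [h]; decide⟩
        have hJ : s.take 2 ≠ ['C','L'] := fun h => h22 ⟨pv_take_len rfl h, by rw [h]; decide⟩
        simp [hA, hB, hC, hD, hE, hF, hG, hH, hI, hJ]

-- B's matcher also computes pvC
lemma pv_bases_short {p : List Char} (h : p.length ≤ 1) :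
    PySem.Set.contains pvBaseSet p = false := by
  rcases hc : PySem.Set.contains pvBaseSet p with _ | _
  · rfl
  · have := pv_bases_len hc; omega

lemma pv_map2_iff (a b : Char) :
    pvLiveParentMap.contains [a,b] = true ↔ PySem.Set.contains pvBaseSet [a,b] = true := by
  rw [pv_contains_iff, pv_bases_iff]
  constructor
  · rintro (h|h|h|h|h|h|h|h|h|h)
    · exact absurd h (by simp)
    · exact absurd h (by simp)
    · exact absurd h (by simp)
    · exact absurd h (by simp)
    · exact absurd h (by simp)
    · exact Or.inl h
    · exact Or.inr (Or.inl h)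
    · exact Or.inr (Or.inr (Or.inl h))
    · exact Or.inr (Or.inr (Or.inr (Or.inl h)))
    · exact Or.inr (Or.inr (Or.inr (Or.inr h)))
  · rintro (h|h|h|h|h) <;>
      (simp only [List.cons.injEq, and_true] at h; obtain ⟨h1, h2⟩ := h; subst h1; subst h2; simp)

lemma pv_map3_iff (a b c : Char) :
    pvLiveParentMap.contains [a,b,c] = true ↔
      (a = 'M' ∧ PySem.Set.contains pvBaseSet [b,c] = true) := by
  rw [pv_contains_iff, pv_bases_iff]
  constructor
  · rintro (h|h|h|h|h|h|h|h|h|h)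
    · simp only [List.cons.injEq, and_true] at h
      obtain ⟨h1, h2, h3⟩ := h
      exact ⟨h1, by subst h2; subst h3; simp⟩
    · simp only [List.cons.injEq, and_true] at h
      obtain ⟨h1, h2, h3⟩ := h
      exact ⟨h1, by subst h2; subst h3; simp⟩
    · simp only [List.cons.injEq, and_true] at h
      obtain ⟨h1, h2, h3⟩ := h
      exact ⟨h1, by subst h2; subst h3; simp⟩
    · simp only [List.cons.injEq, and_true] at h
      obtain ⟨h1, h2, h3⟩ := h
      exact ⟨h1, by subst h2; subst h3; simp⟩
    · simp only [List.cons.injEq, and_true] at h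
      obtain ⟨h1, h2, h3⟩ := h
      exact ⟨h1, by subst h2; subst h3; simp⟩
    · exact absurd h (by simp)
    · exact absurd h (by simp)
    · exact absurd h (by simp)
    · exact absurd h (by simp)
    · exact absurd h (by simp)
  · rintro ⟨ha, h|h|h|h|h⟩ <;> subst ha <;>
      (simp only [List.cons.injEq, and_true] at h; obtain ⟨h1, h2⟩ := h; subst h1; subst h2; simp)

lemma pv_B_core (s : List Char) :
    (if s.take 1 = ['M'] ∧ PySem.Set.contains pvBaseSet ((s.drop 1).take 2) then
        some (String.ofList (s.take 3))
     else if PySem.Set.contains pvBaseSet (s.take 2) then some (String.ofList (s.take 2))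
     else none) = (pvC s).map String.ofList := by
  have h0 : PySem.Set.contains pvBaseSet ([] : List Char) = false := by decide
  rcases s with _ | ⟨a, _ | ⟨b, _ | ⟨c, t⟩⟩⟩ <;>
    simp only [List.take_succ_cons, List.take_zero, List.take_nil, List.drop_succ_cons,
      List.drop_zero, List.drop_nil, pvC, List.length_cons, List.length_nil,
      apply_ite (Option.map String.ofList), Option.map_some, Option.map_none]
  · refine if_congr ?_ rfl (if_congr ?_ rfl rfl)
    · exact iff_of_false (by rintro ⟨h, -⟩; simp at h) (by rintro ⟨h, -⟩; omega)
    · exact iff_of_false (by rw [h0]; simp) (by rintro ⟨h, -⟩; omega)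
  · have h1 : PySem.Set.contains pvBaseSet [a] = false := pv_bases_short (by simp)
    refine if_congr ?_ rfl (if_congr ?_ rfl rfl)
    · exact iff_of_false (by rintro ⟨-, h⟩; rw [h0] at h; simp at h) (by rintro ⟨h, -⟩; omega)
    · exact iff_of_false (by rw [h1]; simp) (by rintro ⟨h, -⟩; omega)
  · have h1 : PySem.Set.contains pvBaseSet [b] = false := pv_bases_short (by simp)
    refine if_congr ?_ rfl (if_congr ?_ rfl rfl)
    · exact iff_of_false (by rintro ⟨-, h⟩; rw [h1] at h; simp at h) (by rintro ⟨h, -⟩; omega)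
    · constructor
      · intro h
        exact ⟨by omega, (pv_map2_iff a b).2 h⟩
      · rintro ⟨-, h⟩
        exact (pv_map2_iff a b).1 h
  · refine if_congr ?_ rfl (if_congr ?_ rfl rfl)
    · constructor
      · rintro ⟨ha, hb⟩
        exact ⟨by omega, (pv_map3_iff a b c).2 ⟨by injection ha, hb⟩⟩
      · rintro ⟨-, h⟩
        obtain ⟨h1, h2⟩ := (pv_map3_iff a b c).1 h
        exact ⟨by rw [h1], h2⟩
    · constructor
      · intro h
        exact ⟨by omega, (pv_map2_iff a b).2 h⟩
      · rintro ⟨-, h⟩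
        exact (pv_map2_iff a b).1 h

-- both normalizations compute takeWhile (· ≠ '.') after upper/strip
lemma pv_go0_headD (fuel : Nat) (l : List Char) (a : List Char) :
    (PySem.Chars.splitOnMax.go ['.'] fuel 0 l [] [a]).headD [] = a := by
  cases fuel with
  | zero => simp [PySem.Chars.splitOnMax.go]
  | succ f => cases l <;> simp [PySem.Chars.splitOnMax.go]

lemma pv_go1_headD (fuel : Nat) (l cur : List Char) (h : l.length ≤ fuel) :
    (PySem.Chars.splitOnMax.go ['.'] (fuel + 1) 1 l cur []).headD [] =
      cur.reverse ++ l.takeWhile (fun c => c != '.') := by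
  induction fuel generalizing l cur with
  | zero =>
    interval_cases hl : l.length
    all_goals {
      cases l with
      | nil => simp [PySem.Chars.splitOnMax.go]
      | cons c r => simp at hl
    }
  | succ f ih =>
    cases l with
    | nil => simp [PySem.Chars.splitOnMax.go]
    | cons c r =>
      by_cases hc : c = '.'
      · subst hc
        rw [PySem.Chars.splitOnMax.go]
        simp only [List.isPrefixOf, Bool.and_true, beq_self_eq_true, if_true, if_neg (by omega : ¬ (1 : Nat) = 0), List.takeWhile_cons, bne_self_eq_false, Bool.false_eq_true, if_false, List.append_nil]
        simpa [List.headD_eq_head?_getD] using pv_go0_headD (f+1) r cur.reverse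
      · rw [PySem.Chars.splitOnMax.go]
        have hp : List.isPrefixOf ['.'] (c :: r) = false := by
          simp [List.isPrefixOf]; exact fun h => absurd h.symm hc
        simp only [hp, if_neg (by omega : ¬ (1 : Nat) = 0), Bool.false_eq_true, if_false]
        rw [ih r (c :: cur) (by simpa using Nat.lt_succ_iff.mp (by simpa using h))]
        simp [hc]

lemma pv_split_headD (t : List Char) :
    (PySem.Chars.splitOnMax t ['.'] 1).headD [] = t.takeWhile (fun c => c != '.') := by
  unfold PySem.Chars.splitOnMax
  rw [if_neg (by omega : ¬ (1 : Int) < 0)]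
  simpa using pv_go1_headD t.length t [] (le_refl _)


lemma pv_no_dot_takeWhile {u : List Char} (h : PySem.Chars.isIn ['.'] u = false) :
    u.takeWhile (fun c => c != '.') = u := by
  rw [List.takeWhile_eq_self_iff]
  intro c hc
  by_contra hne
  simp at hne
  subst hne
  have : (['.'] : List Char) <:+: u := by
    obtain ⟨l1, l2, hsplit⟩ := List.append_of_mem hc
    exact ⟨l1, l2, by simp [hsplit]⟩
  rw [PySem.Chars.isIn_eq_false_iff] at h
  exact h this


lemma pv_norm_core (t u : List Char)
    (hu : u = if PySem.Chars.endswith t ['.','F','U','T'] then PySem.Chars.slice t none (some (-4)) else t) :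
    (if PySem.Chars.isIn ['.'] u then (PySem.Chars.splitOnMax u ['.'] 1).headD [] else u)
      = t.takeWhile (fun c => c != '.') := by
  by_cases he : PySem.Chars.endswith t ['.','F','U','T'] = true
  · rw [if_pos he] at hu
    obtain ⟨v, hv⟩ := (PySem.Chars.endswith_iff t _).1 he
    have hslice : u = v := by
      rw [hu, PySem.Chars.slice_eq_listSlice, PySem.List.slice_to_neg_ofNat t 4 (by omega), ← hv]
      simp
    subst hslice
    have htw : t.takeWhile (fun c => c != '.') = u.takeWhile (fun c => c != '.') := by
      rw [← hv, List.takeWhile_append]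
      split_ifs with hall
      · simp [(List.takeWhile_prefix _).eq_of_length hall]
      · rfl
    rw [htw]
    by_cases hd : PySem.Chars.isIn ['.'] u = true
    · rw [if_pos hd, pv_split_headD]
    · rw [if_neg hd, pv_no_dot_takeWhile (by simpa using hd)]
  · rw [if_neg he] at hu
    rw [hu]
    by_cases hd : PySem.Chars.isIn ['.'] t = true
    · rw [if_pos hd, pv_split_headD]
    · rw [if_neg hd, pv_no_dot_takeWhile (by simpa using hd)]


lemma pv_norm_eq (text : String) : pvNormRoot text = pvNormB text := by
  unfold pvNormB
  rw [pv_split_headD]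
  exact pv_norm_core _ _ rfl

-- ===== VERDICT (by name: the statement is the Claim_ definition above) =====
theorem map_symbol_text_to_root_py_spec : Claim_equal_map_symbol_text_to_root_py := by
  intro text _
  unfold Spec_map_symbol_text_to_root_py map_symbol_text_to_root_py map_symbol_text_to_root_py_alt
  rw [pv_B_core, ← pv_norm_eq, ← pv_A_core]
  by_cases h : pvLiveParentMap.contains (pvNormRoot text) = true <;> simp [h]
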